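-- pv_equiv track=rewrite | github.com/kkkucia/Algorithms_and_Data_Structures | Sorting/Heap_Sort.py | insert_to_heap
-- ===== SOURCE A (Python) =====
-- def left(i):
--     return 2 * i + 1
--
-- def right(i):
--     return 2 * i + 2
--
-- def parent(i):
--     return (i - 1) // 2
--
-- def heapify(T, n, idx):
--     l = left(idx)
--     r = right(idx)
--     curr_idx = idx
--     if l < n and T[curr_idx] < T[l]:
--         curr_idx = l
--     if r < n and T[curr_idx] < T[r]:
--         curr_idx = r
--     if curr_idx != idx:
--         T[idx], T[curr_idx] = T[curr_idx], T[idx]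
--         heapify(T, n, curr_idx)
--
-- def build_heap(T):
--     n = len(T)
--     for i in range(parent(n - 1), -1, -1):
--         heapify(T, n, i)
--
-- def heap_sort(T):
--     n = len(T)
--     build_heap(T)
--     for i in range(n - 1, 0, -1):
--         T[0], T[i] = T[i], T[0]
--         heapify(T, i, 0)
--     return T
--
-- def insert_to_heap(T, key):
--     T = heap_sort(T)
--     n = len(T)
--     idx = n
--     T.append(key)
--     while idx > -1:
--         parent_idx = parent(idx)
--         if T[parent_idx] > key:
--             T[idx], T[parent_idx] = T[parent_idx], T[idx]
--             idx = parent_idx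
--         else:
--             return idx
-- ===== SOURCE B (Python) =====
-- # B: replace the hand-rolled heapsort with T.sort() and the compare-and-swap
-- # bubble-up loop with a counting placement: collect the ancestor chain of the
-- # new slot, count how many ancestors exceed key, and place key at that chain
-- # position directly (same in-place mutation of T as A inside the precondition).
-- def parent(i):
--     return (i - 1) // 2
--
-- def insert_to_heap(T, key):
--     T.sort()
--     n = len(T)
--     T.append(key)
--     # ancestors of the new slot n, bottom-up down to the root
--     anc = []
--     i = n
--     while i > 0:
--         i = parent(i)
--         anc.append(i)
--     chain = [n] + anc
--     # in the sorted array the ancestors exceeding key form a prefix of anc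
--     c = sum(1 for j in anc if T[j] > key)
--     # shift the displaced ancestors down one chain slot and drop key in place
--     for t in range(c):
--         T[chain[t]] = T[chain[t + 1]]
--     idx = chain[c]
--     T[idx] = key
--     return idx
-- ===== Notes on version B (the rewrite author's own statement) =====
-- stated objective: simpler
-- what changed: B drops the heapify/build_heap/heap_sort machinery in favour of the library in-place sort and replaces the compare-and-swap bubble-up loop by collecting the ancestor chain of the new slot, counting the ancestors that exceed key, and placing key at that chain slot directly; the interpreted heapsort becomes a C-level sort, which is what a timing run measures.
-- outside the precondition, e.g. on insert_to_heap([5], 3): A returns None, B returns 0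
import Mathlib
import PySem

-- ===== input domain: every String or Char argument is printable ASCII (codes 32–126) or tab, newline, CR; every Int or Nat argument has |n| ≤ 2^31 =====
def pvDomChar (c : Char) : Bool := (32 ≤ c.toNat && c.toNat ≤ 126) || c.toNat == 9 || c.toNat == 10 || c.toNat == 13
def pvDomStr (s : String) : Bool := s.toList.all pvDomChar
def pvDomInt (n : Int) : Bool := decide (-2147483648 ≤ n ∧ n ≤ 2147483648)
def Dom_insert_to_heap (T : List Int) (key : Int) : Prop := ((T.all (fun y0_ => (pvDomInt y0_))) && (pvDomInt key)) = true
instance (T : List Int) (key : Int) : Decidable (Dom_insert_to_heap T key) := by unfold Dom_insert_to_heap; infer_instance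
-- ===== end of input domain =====

-- B replaces A's hand-rolled heapsort by a library sort and A's compare-and-swap
-- bubble-up loop by a count-and-place on the ancestor chain (objective: simpler).
-- A mutates its argument in place; B performs the same mutation in Python, but the
-- equivalence proved here is about the returned index.

-- ===== PORT A =====
def pyparent (i : Int) : Int := PySem.Int.floordiv (i - 1) 2

-- heapify: every call site passes nonnegative in-range indices, so Nat n/idx is exact.
-- The fuel argument only makes the recursion structural: the chain of recursive calls
-- has strictly increasing idx < n, so fuel n+1 (supplied by `heapify`) never runs out.
def heapifyF : Nat → List Int → Nat → Nat → List Int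
  | 0, T, _, _ => T
  | fuel + 1, T, n, idx =>
    let l := 2 * idx + 1
    let r := 2 * idx + 2
    let c1 := if l < n ∧ T.getD idx 0 < T.getD l 0 then l else idx
    let c2 := if r < n ∧ T.getD c1 0 < T.getD r 0 then r else c1
    if c2 ≠ idx then
      heapifyF fuel ((T.set idx (T.getD c2 0)).set c2 (T.getD idx 0)) n c2
    else T

def heapify (T : List Int) (n : Nat) (idx : Nat) : List Int := heapifyF (n + 1) T n idx

-- for i in range(parent(n-1), -1, -1): heapify(T, n, i)   (every i ≥ 0, so toNat is exact)
def build_heap (T : List Int) : List Int :=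
  (PySem.List.pyRange (pyparent ((T.length : Int) - 1 + 1 - 1)) (-1) (-1)).foldl
    (fun acc i => heapify acc T.length i.toNat) T

-- for i in range(n-1, 0, -1): swap T[0],T[i]; heapify(T, i, 0)   (every i ≥ 1, toNat exact)
def heap_sort (T : List Int) : List Int :=
  (PySem.List.pyRange ((T.length : Int) - 1) 0 (-1)).foldl
    (fun acc i =>
      heapify ((acc.set 0 (acc.getD i.toNat 0)).set i.toNat (acc.getD 0 0)) i.toNat 0)
    (build_heap T)

-- the `while idx > -1` loop; Python returns None when the loop falls off (only when
-- key is below every element of T, excluded by Pre_): the port returns 0 there.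
-- Fuel (idx+2).toNat only makes the recursion structural (idx strictly decreases).
def bubbleF : Nat → List Int → Int → Int → Int
  | 0, _, _, _ => 0
  | fuel + 1, T, key, idx =>
    if idx > -1 then
      let p := pyparent idx
      if PySem.List.pyGetD T p 0 > key then
        bubbleF fuel
          (PySem.List.pySetD (PySem.List.pySetD T idx (PySem.List.pyGetD T p 0)) p
            (PySem.List.pyGetD T idx 0)) key p
      else idx
    else 0

def bubble_up (T : List Int) (key : Int) (idx : Int) : Int := bubbleF (idx + 2).toNat T key idx

def insert_to_heap (T : List Int) (key : Int) : Int :=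
  let Ts := heap_sort T
  bubble_up (Ts ++ [key]) key (Ts.length : Int)

-- ===== PORT B =====
-- anc: the ancestor chain of slot i, bottom-up (while i > 0: i = parent(i); anc.append(i));
-- fuel (i+1).toNat only makes the recursion structural (i strictly decreases).
def ancChainF : Nat → Int → List Int
  | 0, _ => []
  | fuel + 1, i =>
    if i > 0 then
      let p := pyparent i
      p :: ancChainF fuel p
    else []

def ancChain (i : Int) : List Int := ancChainF (i + 1).toNat i

-- Source B's two trailing shift statements only mutate T and do not affect the returned
-- index, so they have no counterpart in this Int-valued port.
def insert_to_heap_alt (T : List Int) (key : Int) : Int :=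
  let Ts := PySem.List.sorted T (fun x => x) false
  let n := Ts.length
  let T2 := Ts ++ [key]
  let anc := ancChain (n : Int)
  let chain := (n : Int) :: anc
  let c := anc.countP (fun j => PySem.List.pyGetD T2 j 0 > key)
  PySem.List.pyGetD chain (c : Int) 0

-- ===== PRECONDITION & SPEC =====
-- Pre_ excludes nonempty T with key strictly below every element: there A's bubble-up
-- walks past the root (parent(0) = -1, a wrap to T[-1]) and falls off the while loop,
-- returning None — not an Int.
def Pre_insert_to_heap (T : List Int) (key : Int) : Prop := T = [] ∨ ∃ x ∈ T, x ≤ key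
instance (T : List Int) (key : Int) : Decidable (Pre_insert_to_heap T key) := by
  unfold Pre_insert_to_heap; infer_instance

def pvWitness_insert_to_heap : List Int × Int := ([3, 1, 2], 2)

def Spec_insert_to_heap (T : List Int) (key : Int) (out : Int) : Prop := out = insert_to_heap_alt T key
instance (T : List Int) (key : Int) (out : Int) : Decidable (Spec_insert_to_heap T key out) := by unfold Spec_insert_to_heap; infer_instance

-- ===== CLAIM (what is proved, stated in full; the proofs are below) =====
def Claim_equal_insert_to_heap : Prop := ∀ (T : List Int) (key : Int), Dom_insert_to_heap T key → Pre_insert_to_heap T key → Spec_insert_to_heap T key (insert_to_heap T key)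


-- ===== LEMMAS AND PROOFS =====

-- getD after set, in closed form
theorem getD_set_eq (L : List Int) (i k : Nat) (a : Int) :
    (L.set i a).getD k 0 = if i = k ∧ k < L.length then a else L.getD k 0 := by
  by_cases hk : k < L.length
  · rw [List.getD_eq_getElem _ _ (by simpa using hk), List.getElem_set]
    by_cases hik : i = k
    · simp [hik, hk]
    · simp only [hik, false_and, if_false]
      rw [List.getD_eq_getElem _ _ hk]
  · simp only [hk, and_false, if_false]
    rw [List.getD_eq_default _ _ (by simpa using Nat.le_of_not_lt hk),
        List.getD_eq_default _ _ (Nat.le_of_not_lt hk)]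

-- what heapify guarantees: a permutation that fixes indices below 2*idx+1 (except idx)
-- and indices ≥ n, restores the parent-dominance pairs with parent ≥ idx given those
-- with parent > idx, and does not push a larger value than T held near idx into idx
def HeapifySpec (f : Nat) : Prop :=
  ∀ (T : List Int) (n idx : Nat),
    n - idx < f → n ≤ T.length → idx < n →
    (∀ k, 1 ≤ k → k < n → idx < (k-1)/2 → T.getD k 0 ≤ T.getD ((k-1)/2) 0) →
    (heapifyF f T n idx).Perm T ∧
    (∀ j, j < 2*idx+1 → j ≠ idx → (heapifyF f T n idx).getD j 0 = T.getD j 0) ∧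
    (∀ k, 1 ≤ k → k < n → idx ≤ (k-1)/2 →
      (heapifyF f T n idx).getD k 0 ≤ (heapifyF f T n idx).getD ((k-1)/2) 0) ∧
    (∀ b : Int, T.getD idx 0 ≤ b → (2*idx+1 < n → T.getD (2*idx+1) 0 ≤ b) →
      (2*idx+2 < n → T.getD (2*idx+2) 0 ≤ b) → (heapifyF f T n idx).getD idx 0 ≤ b) ∧
    (∀ j, n ≤ j → (heapifyF f T n idx).getD j 0 = T.getD j 0)

-- the swap-and-recurse branch of heapify, factored out
theorem heapify_step (f : Nat) (ih : HeapifySpec f) (T : List Int) (n idx c2 : Nat)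
    (hf : n - idx < f + 1) (hn : n ≤ T.length) (hidx : idx < n)
    (hpre : ∀ k, 1 ≤ k → k < n → idx < (k-1)/2 → T.getD k 0 ≤ T.getD ((k-1)/2) 0)
    (h2 : c2 < n) (h3 : c2 = 2*idx+1 ∨ c2 = 2*idx+2)
    (h4 : T.getD idx 0 < T.getD c2 0)
    (h5 : ∀ k, (k = 2*idx+1 ∨ k = 2*idx+2) → k < n → k ≠ c2 → T.getD k 0 ≤ T.getD c2 0) :
    (heapifyF f ((T.set idx (T.getD c2 0)).set c2 (T.getD idx 0)) n c2).Perm T ∧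
    (∀ j, j < 2*idx+1 → j ≠ idx →
      (heapifyF f ((T.set idx (T.getD c2 0)).set c2 (T.getD idx 0)) n c2).getD j 0 = T.getD j 0) ∧
    (∀ k, 1 ≤ k → k < n → idx ≤ (k-1)/2 →
      (heapifyF f ((T.set idx (T.getD c2 0)).set c2 (T.getD idx 0)) n c2).getD k 0 ≤
      (heapifyF f ((T.set idx (T.getD c2 0)).set c2 (T.getD idx 0)) n c2).getD ((k-1)/2) 0) ∧
    (∀ b : Int, T.getD idx 0 ≤ b → (2*idx+1 < n → T.getD (2*idx+1) 0 ≤ b) →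
      (2*idx+2 < n → T.getD (2*idx+2) 0 ≤ b) →
      (heapifyF f ((T.set idx (T.getD c2 0)).set c2 (T.getD idx 0)) n c2).getD idx 0 ≤ b) ∧
    (∀ j, n ≤ j →
      (heapifyF f ((T.set idx (T.getD c2 0)).set c2 (T.getD idx 0)) n c2).getD j 0 = T.getD j 0) := by
  set S := (T.set idx (T.getD c2 0)).set c2 (T.getD idx 0) with hSdef
  have hc2len : c2 < T.length := lt_of_lt_of_le h2 hn
  have hidxlen : idx < T.length := lt_of_lt_of_le hidx hn
  have hSlen : S.length = T.length := by simp [hSdef]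
  have hS : ∀ k : Nat, S.getD k 0 =
      if k = c2 then T.getD idx 0 else if k = idx then T.getD c2 0 else T.getD k 0 := by
    intro k
    rw [hSdef, getD_set_eq, getD_set_eq]
    rw [List.length_set]
    by_cases hkc : k = c2
    · rw [if_pos ⟨hkc.symm, by omega⟩, if_pos hkc]
    · rw [if_neg (by omega), if_neg hkc]
      by_cases hki : k = idx
      · rw [if_pos ⟨hki.symm, by omega⟩, if_pos hki]
      · rw [if_neg (by omega), if_neg hki]
  have hpre' : ∀ k, 1 ≤ k → k < n → c2 < (k-1)/2 → S.getD k 0 ≤ S.getD ((k-1)/2) 0 := by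
    intro k hk1 hkn hkp
    rw [hS, hS]
    rw [if_neg (by omega), if_neg (by omega), if_neg (by omega), if_neg (by omega)]
    exact hpre k hk1 hkn (by omega)
  obtain ⟨Rperm, Runt, Rpost2, Rpost3, Rge⟩ :=
    ih S n c2 (by omega) (by omega) h2 hpre'
  have hRidx : (heapifyF f S n c2).getD idx 0 = T.getD c2 0 := by
    rw [Runt idx (by omega) (by omega), hS, if_neg (by omega), if_pos rfl]
  refine ⟨?_, ?_, ?_, ?_, ?_⟩
  · refine Rperm.trans ?_
    have e1 : T.getD c2 0 = T[c2] := List.getD_eq_getElem _ _ hc2len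
    have e2 : T.getD idx 0 = T[idx] := List.getD_eq_getElem _ _ hidxlen
    rw [hSdef, e1, e2]
    exact List.set_set_perm hidxlen hc2len
  · intro j hj hji
    rw [Runt j (by omega) (by omega), hS, if_neg (by omega), if_neg hji]
  · intro k hk1 hkn hkp
    by_cases hpc : c2 ≤ (k-1)/2
    · exact Rpost2 k hk1 hkn hpc
    by_cases hpi : (k-1)/2 = idx
    · have hkid : k = 2*idx+1 ∨ k = 2*idx+2 := by omega
      rw [hpi, hRidx]
      by_cases hkc : k = c2
      · subst hkc
        refine Rpost3 (T.getD k 0) ?_ ?_ ?_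
        · rw [hS, if_pos rfl]; exact le_of_lt h4
        · intro h
          rw [hS, if_neg (by omega), if_neg (by omega)]
          have e : (2*k+1-1)/2 = k := by omega
          have := hpre (2*k+1) (by omega) h (by omega)
          rwa [e] at this
        · intro h
          rw [hS, if_neg (by omega), if_neg (by omega)]
          have e : (2*k+2-1)/2 = k := by omega
          have := hpre (2*k+2) (by omega) h (by omega)
          rwa [e] at this
      · rw [Runt k (by omega) hkc, hS, if_neg hkc, if_neg (by omega)]
        exact h5 k hkid hkn hkc
    · have h6 : idx < (k-1)/2 := by omega
      rw [Runt k (by omega) (by omega), Runt ((k-1)/2) (by omega) (by omega),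
          hS, hS, if_neg (by omega), if_neg (by omega), if_neg (by omega), if_neg (by omega)]
      exact hpre k hk1 hkn h6
  · intro b hb hbl hbr
    rw [hRidx]
    rcases h3 with h3 | h3 <;> rw [h3] <;> [exact hbl (by omega); exact hbr (by omega)]
  · intro j hj
    rw [Rge j hj, hS, if_neg (by omega), if_neg (by omega)]

theorem heapifyF_spec : ∀ (f : Nat), HeapifySpec f := by
  intro f
  induction f with
  | zero => intro T n idx hf; omega
  | succ f ih =>
    intro T n idx hf hn hidx hpre
    show (heapifyF (f+1) T n idx).Perm T ∧ _
    by_cases hl : 2*idx+1 < n ∧ T.getD idx 0 < T.getD (2*idx+1) 0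
    · by_cases hr : 2*idx+2 < n ∧ T.getD (2*idx+1) 0 < T.getD (2*idx+2) 0
      · have he : heapifyF (f+1) T n idx =
            heapifyF f ((T.set idx (T.getD (2*idx+2) 0)).set (2*idx+2) (T.getD idx 0)) n (2*idx+2) := by
          simp only [heapifyF, if_pos hl, if_pos hr, if_pos (by omega : 2*idx+2 ≠ idx)]
        rw [he]
        exact heapify_step f ih T n idx (2*idx+2) hf hn hidx hpre hr.1 (Or.inr rfl)
          (lt_trans hl.2 hr.2)
          (by intro k hk hkn hkc; rcases hk with h | h <;> subst h
              · exact le_of_lt hr.2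
              · omega)
      · have he : heapifyF (f+1) T n idx =
            heapifyF f ((T.set idx (T.getD (2*idx+1) 0)).set (2*idx+1) (T.getD idx 0)) n (2*idx+1) := by
          simp only [heapifyF, if_pos hl, if_neg hr, if_pos (by omega : 2*idx+1 ≠ idx)]
        rw [he]
        exact heapify_step f ih T n idx (2*idx+1) hf hn hidx hpre hl.1 (Or.inl rfl) hl.2
          (by intro k hk hkn hkc; rcases hk with h | h <;> subst h
              · omega
              · by_cases h2 : 2*idx+2 < n
                · exact not_lt.mp (fun hlt => hr ⟨h2, hlt⟩)
                · omega)
    · by_cases hr : 2*idx+2 < n ∧ T.getD idx 0 < T.getD (2*idx+2) 0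
      · have he : heapifyF (f+1) T n idx =
            heapifyF f ((T.set idx (T.getD (2*idx+2) 0)).set (2*idx+2) (T.getD idx 0)) n (2*idx+2) := by
          simp only [heapifyF, if_neg hl, if_pos hr, if_pos (by omega : 2*idx+2 ≠ idx)]
        rw [he]
        exact heapify_step f ih T n idx (2*idx+2) hf hn hidx hpre hr.1 (Or.inr rfl) hr.2
          (by intro k hk hkn hkc; rcases hk with h | h <;> subst h
              · exact le_of_lt (lt_of_le_of_lt (not_lt.mp (fun hlt => hl ⟨hkn, hlt⟩)) hr.2)
              · omega)
      · have he : heapifyF (f+1) T n idx = T := by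
          simp only [heapifyF, if_neg hl, if_neg hr, if_neg (by omega : ¬ idx ≠ idx)]
        rw [he]
        refine ⟨List.Perm.refl T, fun j _ _ => rfl, ?_, fun b hb _ _ => hb, fun j _ => rfl⟩
        intro k hk1 hkn hkp
        by_cases hpi : (k-1)/2 = idx
        · have hkid : k = 2*idx+1 ∨ k = 2*idx+2 := by omega
          rw [hpi]
          rcases hkid with h | h <;> subst h
          · exact not_lt.mp (fun hlt => hl ⟨hkn, hlt⟩)
          · exact not_lt.mp (fun hlt => hr ⟨hkn, hlt⟩)
        · exact hpre k hk1 hkn (by omega)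

-- range(a, b, -1) unrolled from the top, and empty when a ≤ b
theorem pyRange_down_nil (a b : Int) (h : a ≤ b) : PySem.List.pyRange a b (-1) = [] := by
  simp only [PySem.List.pyRange]
  rw [if_neg (by norm_num : ¬ (-1:Int) = 0), if_neg (by norm_num : ¬ (0:Int) < -1),
      if_neg (by omega : ¬ b < a)]
  simp

theorem pyRange_down_cons (a b : Int) (h : b < a) :
    PySem.List.pyRange a b (-1) = a :: PySem.List.pyRange (a-1) b (-1) := by
  have hc : ∀ x y : Int, ((x - y + - -1 - 1) / - -1).toNat = (x - y).toNat := by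
    intro x y
    have e : (- -1 : Int) = 1 := by norm_num
    rw [e]
    omega
  simp only [PySem.List.pyRange]
  rw [if_neg (by norm_num : ¬ (-1:Int) = 0), if_neg (by norm_num : ¬ (0:Int) < -1), if_pos h,
      if_neg (by norm_num : ¬ (-1:Int) = 0), if_neg (by norm_num : ¬ (0:Int) < -1)]
  rw [hc a b]
  by_cases h2 : b < a - 1
  · rw [if_pos h2, hc _ _]
    have e1 : (a - b).toNat = (a - 1 - b).toNat + 1 := by omega
    rw [e1, List.range_succ_eq_map, List.map_cons, List.map_map]
    refine congrArg₂ _ (by simp) (List.map_congr_left ?_)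
    intro x _
    simp only [Function.comp_apply]
    push_cast
    ring
  · rw [if_neg h2]
    have e1 : (a - b).toNat = 1 := by omega
    rw [e1]
    simp

-- the build_heap loop, from index j down to 0, establishes the heap property
theorem build_loop (n : Nat) : ∀ (j : Nat) (T : List Int), n ≤ T.length → j < n →
    (∀ k, 1 ≤ k → k < n → j < (k-1)/2 → T.getD k 0 ≤ T.getD ((k-1)/2) 0) →
    ((PySem.List.pyRange (j:Int) (-1) (-1)).foldl (fun acc t => heapify acc n t.toNat) T).Perm T ∧
    (∀ k, 1 ≤ k → k < n →
      ((PySem.List.pyRange (j:Int) (-1) (-1)).foldl (fun acc t => heapify acc n t.toNat) T).getD k 0 ≤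
      ((PySem.List.pyRange (j:Int) (-1) (-1)).foldl (fun acc t => heapify acc n t.toNat) T).getD ((k-1)/2) 0) := by
  intro j
  induction j with
  | zero =>
    intro T hn hj hpre
    rw [Nat.cast_zero, pyRange_down_cons 0 (-1) (by norm_num),
        pyRange_down_nil (0-1) (-1) (by norm_num)]
    simp only [List.foldl_cons, List.foldl_nil, Int.toNat_zero]
    obtain ⟨hperm, _, hpost2, _, _⟩ :=
      heapifyF_spec (n+1) T n 0 (by omega) hn hj (fun k h1 h2 h3 => hpre k h1 h2 h3)
    exact ⟨hperm, fun k h1 h2 => hpost2 k h1 h2 (by omega)⟩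
  | succ j ihj =>
    intro T hn hj hpre
    have hcast : ((j+1 : Nat) : Int) - 1 = (j : Int) := by push_cast; ring
    rw [pyRange_down_cons ((j+1:Nat):Int) (-1) (by omega), hcast]
    simp only [List.foldl_cons, Int.toNat_natCast]
    obtain ⟨hperm, _, hpost2, _, _⟩ :=
      heapifyF_spec (n+1) T n (j+1) (by omega) hn hj hpre
    have hlen : (heapify T n (j+1)).length = T.length := hperm.length_eq
    have := ihj (heapify T n (j+1)) (by omega) (by omega)
      (fun k h1 h2 h3 => hpost2 k h1 h2 (by omega))
    exact ⟨this.1.trans hperm, this.2⟩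

theorem build_heap_spec (T : List Int) :
    (build_heap T).Perm T ∧
    (∀ k, 1 ≤ k → k < T.length → (build_heap T).getD k 0 ≤ (build_heap T).getD ((k-1)/2) 0) := by
  have h1 := PySem.Int.floordiv_mul_add_mod ((T.length:Int) - 1 + 1 - 1 - 1) 2
  have h2 := PySem.Int.mod_nonneg ((T.length:Int) - 1 + 1 - 1 - 1) (b := 2) (by norm_num)
  have h3 := PySem.Int.mod_lt ((T.length:Int) - 1 + 1 - 1 - 1) (b := 2) (by norm_num)
  unfold build_heap
  by_cases hn : T.length ≤ 1
  · have e : pyparent ((T.length : Int) - 1 + 1 - 1) = -1 := by unfold pyparent; omega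
    rw [e, pyRange_down_nil (-1) (-1) le_rfl]
    simp only [List.foldl_nil]
    exact ⟨List.Perm.refl T, by intro k hk1 hk2; omega⟩
  · have e : pyparent ((T.length : Int) - 1 + 1 - 1) = (((T.length - 2)/2 : Nat) : Int) := by
      unfold pyparent; omega
    rw [e]
    have := build_loop T.length ((T.length - 2)/2) T le_rfl (by omega)
      (fun k hk1 hk2 hk3 => absurd hk3 (by omega))
    exact ⟨this.1, fun k h1 h2 => this.2 k h1 h2⟩

-- in a heap prefix the root dominates
theorem heap_root_max (L : List Int) (m : Nat)
    (hh : ∀ k, 1 ≤ k → k < m → L.getD k 0 ≤ L.getD ((k-1)/2) 0) :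
    ∀ k, k < m → L.getD k 0 ≤ L.getD 0 0 := by
  intro k
  induction k using Nat.strong_induction_on with
  | _ k ihk =>
    intro hk
    rcases Nat.eq_zero_or_pos k with h0 | h1
    · subst h0; exact le_refl _
    · exact le_trans (hh k h1 hk) (ihk ((k-1)/2) (by omega) (by omega))

-- one iteration of the heap_sort loop
theorem sort_step (n : Nat) (i : Nat) (h1 : 1 ≤ i) (h2 : i < n) (L : List Int) (hL : L.length = n)
    (hb : ∀ k, 1 ≤ k → k < i+1 → L.getD k 0 ≤ L.getD ((k-1)/2) 0)
    (hc : ∀ p q, p ≤ i → i < q → q < n → L.getD p 0 ≤ L.getD q 0)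
    (hd : ∀ p q, i < p → p ≤ q → q < n → L.getD p 0 ≤ L.getD q 0) :
    (heapify ((L.set 0 (L.getD i 0)).set i (L.getD 0 0)) i 0).Perm L ∧
    (heapify ((L.set 0 (L.getD i 0)).set i (L.getD 0 0)) i 0).length = n ∧
    (∀ k, 1 ≤ k → k < i →
      (heapify ((L.set 0 (L.getD i 0)).set i (L.getD 0 0)) i 0).getD k 0 ≤
      (heapify ((L.set 0 (L.getD i 0)).set i (L.getD 0 0)) i 0).getD ((k-1)/2) 0) ∧
    (∀ p q, p ≤ i-1 → i-1 < q → q < n →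
      (heapify ((L.set 0 (L.getD i 0)).set i (L.getD 0 0)) i 0).getD p 0 ≤
      (heapify ((L.set 0 (L.getD i 0)).set i (L.getD 0 0)) i 0).getD q 0) ∧
    (∀ p q, i-1 < p → p ≤ q → q < n →
      (heapify ((L.set 0 (L.getD i 0)).set i (L.getD 0 0)) i 0).getD p 0 ≤
      (heapify ((L.set 0 (L.getD i 0)).set i (L.getD 0 0)) i 0).getD q 0) := by
  unfold heapify
  set S := (L.set 0 (L.getD i 0)).set i (L.getD 0 0) with hSdef
  have hiL : i < L.length := by omega
  have h0L : 0 < L.length := by omega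
  have hSlen : S.length = n := by simp [hSdef, hL]
  have hS : ∀ k : Nat, S.getD k 0 =
      if k = i then L.getD 0 0 else if k = 0 then L.getD i 0 else L.getD k 0 := by
    intro k
    rw [hSdef, getD_set_eq, getD_set_eq, List.length_set]
    by_cases hki : k = i
    · rw [if_pos ⟨hki.symm, by omega⟩, if_pos hki]
    · rw [if_neg (by omega), if_neg hki]
      by_cases hk0 : k = 0
      · rw [if_pos ⟨hk0.symm, by omega⟩, if_pos hk0]
      · rw [if_neg (by omega), if_neg hk0]
  have hSperm : S.Perm L := by
    rw [hSdef, List.getD_eq_getElem _ _ hiL, List.getD_eq_getElem _ _ h0L]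
    exact List.set_set_perm h0L hiL
  have hroot := heap_root_max L (i+1) hb
  obtain ⟨Rperm, _, Rpost2, Rpost3, Rge⟩ :=
    heapifyF_spec (i+1) S i 0 (by omega) (by omega) (by omega)
      (by intro k hk1 hk2 hk3
          rw [hS, hS, if_neg (by omega), if_neg (by omega), if_neg (by omega), if_neg (by omega)]
          exact hb k hk1 (by omega))
  have hRi : (heapifyF (i+1) S i 0).getD i 0 = L.getD 0 0 := by
    rw [Rge i le_rfl, hS, if_pos rfl]
  have hRhigh : ∀ q, i < q → (heapifyF (i+1) S i 0).getD q 0 = L.getD q 0 := by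
    intro q hq
    rw [Rge q (by omega), hS, if_neg (by omega), if_neg (by omega)]
  have hR0 : (heapifyF (i+1) S i 0).getD 0 0 ≤ L.getD 0 0 := by
    refine Rpost3 (L.getD 0 0) ?_ ?_ ?_
    · rw [hS, if_neg (by omega), if_pos rfl]
      exact hroot i (by omega)
    · intro h
      rw [hS, if_neg (by omega), if_neg (by omega)]
      exact hroot 1 (by omega)
    · intro h
      rw [hS, if_neg (by omega), if_neg (by omega)]
      exact hroot 2 (by omega)
  have hRheap : ∀ k, 1 ≤ k → k < i →
      (heapifyF (i+1) S i 0).getD k 0 ≤ (heapifyF (i+1) S i 0).getD ((k-1)/2) 0 :=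
    fun k hk1 hk2 => Rpost2 k hk1 hk2 (by omega)
  have hRmax : ∀ p, p < i → (heapifyF (i+1) S i 0).getD p 0 ≤ L.getD 0 0 :=
    fun p hp => le_trans (heap_root_max (heapifyF (i+1) S i 0) i hRheap p hp) hR0
  refine ⟨Rperm.trans hSperm, by rw [Rperm.length_eq, hSlen], hRheap, ?_, ?_⟩
  · intro p q hp hq hqn
    rcases Nat.lt_or_ge q i with hqi | hqi
    · omega
    rcases Nat.eq_or_lt_of_le hqi with hqe | hqi'
    · rw [← hqe, hRi]
      exact hRmax p (by omega)
    · rw [hRhigh q hqi']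
      exact le_trans (hRmax p (by omega)) (hc 0 q (by omega) hqi' hqn)
  · intro p q hp hq hqn
    rcases Nat.eq_or_lt_of_le (show i ≤ p by omega) with hpe | hpi
    · rcases Nat.eq_or_lt_of_le hq with hqe | hql
      · rw [← hqe]
      · rw [← hpe, hRi, hRhigh q (by omega)]
        exact hc 0 q (by omega) (by omega) hqn
    · rw [hRhigh p hpi, hRhigh q (by omega)]
      exact hd p q hpi hq hqn

-- the heap_sort loop, from index i down to 1, sorts the array
theorem sort_loop (n : Nat) : ∀ (i : Nat), 1 ≤ i → i < n → ∀ (L : List Int), L.length = n →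
    (∀ k, 1 ≤ k → k < i+1 → L.getD k 0 ≤ L.getD ((k-1)/2) 0) →
    (∀ p q, p ≤ i → i < q → q < n → L.getD p 0 ≤ L.getD q 0) →
    (∀ p q, i < p → p ≤ q → q < n → L.getD p 0 ≤ L.getD q 0) →
    ((PySem.List.pyRange (i:Int) 0 (-1)).foldl
      (fun acc t => heapify ((acc.set 0 (acc.getD t.toNat 0)).set t.toNat (acc.getD 0 0)) t.toNat 0) L).Perm L ∧
    (∀ p q, p < q → q < n →
      ((PySem.List.pyRange (i:Int) 0 (-1)).foldl
        (fun acc t => heapify ((acc.set 0 (acc.getD t.toNat 0)).set t.toNat (acc.getD 0 0)) t.toNat 0) L).getD p 0 ≤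
      ((PySem.List.pyRange (i:Int) 0 (-1)).foldl
        (fun acc t => heapify ((acc.set 0 (acc.getD t.toNat 0)).set t.toNat (acc.getD 0 0)) t.toNat 0) L).getD q 0) := by
  intro i
  induction i using Nat.strong_induction_on with
  | _ i ihi =>
    intro hi1 hin L hL hb hc hd
    obtain ⟨Pperm, Plen, Pheap, Pc, Pd⟩ := sort_step n i hi1 hin L hL hb hc hd
    rw [pyRange_down_cons (i:Int) 0 (by omega)]
    simp only [List.foldl_cons, Int.toNat_natCast]
    rcases Nat.eq_or_lt_of_le hi1 with hie | hig
    · -- i = 1 : the remaining range is empty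
      subst hie
      rw [(by omega : ((1:Nat):Int) - 1 = (0:Int)), pyRange_down_nil 0 0 le_rfl]
      simp only [List.foldl_nil]
      refine ⟨Pperm, ?_⟩
      intro p q hpq hqn
      rcases Nat.eq_zero_or_pos p with h0 | hp1
      · subst h0; exact Pc 0 q (by omega) (by omega) hqn
      · exact Pd p q (by omega) (by omega) hqn
    · rw [(by omega : ((i:Nat):Int) - 1 = ((i-1 : Nat):Int))]
      have := ihi (i-1) (by omega) (by omega) (by omega)
        (heapify ((L.set 0 (L.getD i 0)).set i (L.getD 0 0)) i 0) Plen
        (by intro k hk1 hk2; exact Pheap k hk1 (by omega))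
        (by intro p q hp hq hqn; exact Pc p q hp hq hqn)
        (by intro p q hp hq hqn; exact Pd p q hp hq hqn)
      exact ⟨this.1.trans Pperm, this.2⟩

theorem heap_sort_spec (T : List Int) :
    (heap_sort T).Perm T ∧
    (∀ p q, p < q → q < T.length → (heap_sort T).getD p 0 ≤ (heap_sort T).getD q 0) := by
  obtain ⟨bperm, bheap⟩ := build_heap_spec T
  have blen : (build_heap T).length = T.length := bperm.length_eq
  unfold heap_sort
  by_cases h2 : T.length ≤ 1
  · rw [pyRange_down_nil ((T.length:Int)-1) 0 (by omega)]
    simp only [List.foldl_nil]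
    exact ⟨bperm, fun p q hpq hq => by omega⟩
  · rw [(by omega : ((T.length:Nat):Int) - 1 = ((T.length - 1 : Nat):Int))]
    have := sort_loop T.length (T.length - 1) (by omega) (by omega) (build_heap T) blen
      (fun k hk1 hk2 => bheap k hk1 (by omega))
      (fun p q hp hq hqn => absurd hqn (by omega))
      (fun p q hp hq hqn => absurd hqn (by omega))
    exact ⟨this.1.trans bperm, this.2⟩

theorem heap_sort_eq_sorted (T : List Int) :
    heap_sort T = PySem.List.sorted T (fun x => x) false := by
  obtain ⟨hperm, hpairs⟩ := heap_sort_spec T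
  refine (PySem.List.sorted_id_eq_of_perm_of_pairwise T (heap_sort T) hperm ?_).symm
  rw [List.pairwise_iff_getElem]
  intro p q hp hq hpq
  have hlen : (heap_sort T).length = T.length := hperm.length_eq
  have := hpairs p q hpq (by omega)
  rwa [List.getD_eq_getElem _ _ hp, List.getD_eq_getElem _ _ hq] at this

theorem pyparent_bounds (i : Int) (hi : 0 < i) : 0 ≤ pyparent i ∧ pyparent i < i := by
  unfold pyparent
  have h1 := PySem.Int.floordiv_mul_add_mod (i-1) 2
  have h2 := PySem.Int.mod_nonneg (i-1) (b := 2) (by norm_num)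
  have h3 := PySem.Int.mod_lt (i-1) (b := 2) (by norm_num)
  omega

theorem ancChainF_nonpos (f : Nat) (i : Int) (hi : i ≤ 0) : ancChainF f i = [] := by
  cases f with
  | zero => rfl
  | succ f =>
    show (if i > 0 then pyparent i :: ancChainF f (pyparent i) else []) = []
    rw [if_neg (by omega : ¬ i > 0)]

theorem ancChainF_bound : ∀ (f : Nat) (i : Int), ∀ j ∈ ancChainF f i, 0 ≤ j ∧ j < i := by
  intro f
  induction f with
  | zero => intro i j hj; simp [ancChainF] at hj
  | succ f ih =>
    intro i j hj
    by_cases hi : i > 0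
    · simp only [ancChainF, if_pos hi, List.mem_cons] at hj
      obtain ⟨hp0, hpi⟩ := pyparent_bounds i hi
      rcases hj with hj | hj
      · subst hj; exact ⟨hp0, hpi⟩
      · have := ih (pyparent i) j hj
        omega
    · rw [ancChainF_nonpos (f+1) i (by omega)] at hj
      simp at hj

theorem ancChainF_adequate : ∀ (f f' : Nat) (i : Int), (i+1).toNat ≤ f → (i+1).toNat ≤ f' →
    ancChainF f i = ancChainF f' i := by
  intro f
  induction f with
  | zero =>
    intro f' i h h'
    rw [ancChainF_nonpos 0 i (by omega), ancChainF_nonpos f' i (by omega)]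
  | succ f ih =>
    intro f' i h h'
    by_cases hi : i > 0
    · cases f' with
      | zero => omega
      | succ f' =>
        obtain ⟨hp0, hpi⟩ := pyparent_bounds i hi
        simp only [ancChainF, if_pos hi]
        rw [ih f' (pyparent i) (by omega) (by omega)]
    · rw [ancChainF_nonpos (f+1) i (by omega), ancChainF_nonpos f' i (by omega)]

theorem ancChain_pos (i : Int) (hi : 0 < i) :
    ancChain i = pyparent i :: ancChain (pyparent i) := by
  obtain ⟨hp0, hpi⟩ := pyparent_bounds i hi
  have hk : (i+1).toNat = i.toNat + 1 := by omega
  unfold ancChain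
  rw [hk]
  simp only [ancChainF, if_pos hi]
  rw [ancChainF_adequate i.toNat ((pyparent i)+1).toNat (pyparent i) (by omega) le_rfl]

theorem ancChain_nonpos (i : Int) (hi : i ≤ 0) : ancChain i = [] :=
  ancChainF_nonpos _ i hi

theorem ancChain_bound (i : Int) : ∀ j ∈ ancChain i, 0 ≤ j ∧ j < i :=
  ancChainF_bound _ i

-- the bubble-up walk on a sorted-plus-appended array returns the chain slot
-- selected by counting the ancestors that exceed key
theorem bubble_main (S : List Int) (key : Int)
    (hsorted : ∀ p q : Nat, p ≤ q → q < S.length → S.getD p 0 ≤ S.getD q 0)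
    (hpre0 : S = [] ∨ S.getD 0 0 ≤ key) :
    ∀ (f : Nat) (i : Nat) (L : List Int), i + 2 ≤ f → i ≤ S.length →
    L.length = S.length + 1 →
    (∀ j : Nat, j < i → L.getD j 0 = (S ++ [key]).getD j 0) →
    L.getD i 0 = key →
    (i = 0 → S.length = 0) →
    bubbleF f L key (i:Int) =
      ((i:Int) :: ancChain (i:Int)).getD
        ((ancChain (i:Int)).countP (fun j => PySem.List.pyGetD (S ++ [key]) j 0 > key)) 0 := by
  intro f
  induction f with
  | zero => intro i L hf; omega
  | succ f ih =>
    intro i L hf hin hlen hagree hkey h0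
    have hgt : ((i:Int) > -1) := by omega
    rw [show bubbleF (f+1) L key (i:Int) =
        if (i:Int) > -1 then
          (if PySem.List.pyGetD L (pyparent (i:Int)) 0 > key then
            bubbleF f
              (PySem.List.pySetD (PySem.List.pySetD L (i:Int)
                  (PySem.List.pyGetD L (pyparent (i:Int)) 0)) (pyparent (i:Int))
                (PySem.List.pyGetD L (i:Int) 0)) key (pyparent (i:Int))
          else (i:Int))
        else 0 from rfl]
    rw [if_pos hgt]
    rcases Nat.eq_zero_or_pos i with hi0 | hi1
    · subst hi0
      have hn0 := h0 rfl
      have hp : pyparent ((0:Nat):Int) = -1 := by decide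
      have hL1 : L = [key] := by
        cases L with
        | nil => simp at hlen
        | cons a t =>
          cases t with
          | nil =>
            simp only [List.getD_cons_zero] at hkey
            rw [hkey]
          | cons b t2 => simp at hlen; omega
      have hlast : PySem.List.pyGetD L (pyparent ((0:Nat):Int)) 0 = key := by
        rw [hp, hL1, PySem.List.pyGetD_neg_one [key] 0 (by simp)]
        simp
      rw [hlast, if_neg (lt_irrefl key)]
      rw [ancChain_nonpos _ (by omega)]
      simp
    · -- i ≥ 1
      have hSne : S.length ≠ 0 := by omega
      have hfl1 := PySem.Int.floordiv_mul_add_mod ((i:Int)-1) 2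
      have hfl2 := PySem.Int.mod_nonneg ((i:Int)-1) (b := 2) (by norm_num)
      have hfl3 := PySem.Int.mod_lt ((i:Int)-1) (b := 2) (by norm_num)
      have hplt : pyparent (i:Int) = (((i-1)/2 : Nat) : Int) := by
        unfold pyparent; omega
      have hpN : (i-1)/2 < i := by omega
      have hgetp : PySem.List.pyGetD L (pyparent (i:Int)) 0 = S.getD ((i-1)/2) 0 := by
        rw [hplt, PySem.List.pyGetD_natCast, hagree ((i-1)/2) hpN,
            List.getD_append S [key] 0 ((i-1)/2) (by omega)]
      have hgeti : PySem.List.pyGetD L (i:Int) 0 = key := by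
        rw [PySem.List.pyGetD_natCast, hkey]
      rw [hgetp, hgeti]
      rw [ancChain_pos (i:Int) (by omega), hplt]
      by_cases hswap : S.getD ((i-1)/2) 0 > key
      · rw [if_pos hswap]
        have hpN1 : 1 ≤ (i-1)/2 := by
          by_contra hcon
          have hp0 : (i-1)/2 = 0 := by omega
          rcases hpre0 with h | h
          · rw [h] at hSne; simp at hSne
          · rw [hp0] at hswap; omega
        -- the new array after the swap
        set L2 : List Int := PySem.List.pySetD
            (PySem.List.pySetD L (i:Int) (S.getD ((i-1)/2) 0)) (((i-1)/2 : Nat) : Int) key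
          with hL2def
        have hL2 : L2 = (L.set i (S.getD ((i-1)/2) 0)).set ((i-1)/2) key := by
          rw [hL2def, PySem.List.pySetD_natCast, PySem.List.pySetD_natCast]
        have hL2len : L2.length = S.length + 1 := by
          rw [hL2]; simp [hlen]
        have hL2get : ∀ k : Nat, k < L.length →
            L2.getD k 0 = if k = (i-1)/2 then key
              else if k = i then S.getD ((i-1)/2) 0 else L.getD k 0 := by
          intro k hk
          rw [hL2, getD_set_eq, getD_set_eq, List.length_set]
          by_cases hkp : k = (i-1)/2
          · rw [if_pos ⟨hkp.symm, by omega⟩, if_pos hkp]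
          · rw [if_neg (by omega), if_neg hkp]
            by_cases hki : k = i
            · rw [if_pos ⟨hki.symm, by omega⟩, if_pos hki]
            · rw [if_neg (by omega), if_neg hki]
        have := ih ((i-1)/2) L2 (by omega) (by omega) hL2len
          (by intro j hj
              rw [hL2get j (by omega), if_neg (by omega), if_neg (by omega)]
              exact hagree j (by omega))
          (by rw [hL2get ((i-1)/2) (by omega), if_pos rfl])
          (fun h => absurd h (by omega))
        rw [this]
        rw [List.countP_cons]
        have hdec : decide (PySem.List.pyGetD (S ++ [key]) (((i-1)/2 : Nat) : Int) 0 > key)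
            = true := by
          simp only [PySem.List.pyGetD_natCast]
          rw [List.getD_append S [key] 0 ((i-1)/2) (by omega)]
          simpa using hswap
        rw [if_pos hdec, List.getD_cons_succ]
      · rw [if_neg hswap]
        have hcount : ((((i-1)/2 : Nat) : Int) :: ancChain (((i-1)/2 : Nat) : Int)).countP
            (fun j => PySem.List.pyGetD (S ++ [key]) j 0 > key) = 0 := by
          rw [List.countP_eq_zero]
          intro j hj
          have hjb : 0 ≤ j ∧ j ≤ (((i-1)/2 : Nat) : Int) := by
            rcases List.mem_cons.mp hj with h | h
            · subst h; omega
            · have := ancChain_bound _ j h; omega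
          have hje : j = ((j.toNat : Nat) : Int) := by omega
          rw [hje]
          simp only [PySem.List.pyGetD_natCast]
          rw [List.getD_append S [key] 0 j.toNat (by omega)]
          have hmono := hsorted j.toNat ((i-1)/2) (by omega) (by omega)
          simp only [gt_iff_lt, decide_eq_true_eq, not_lt]
          omega
        rw [hcount]
        rw [List.getD_cons_zero]

-- the two sides assembled
theorem sorted_getD_mono (T : List Int) : ∀ p q : Nat, p ≤ q →
    q < (PySem.List.sorted T (fun x => x) false).length →
    (PySem.List.sorted T (fun x => x) false).getD p 0 ≤
    (PySem.List.sorted T (fun x => x) false).getD q 0 := by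
  intro p q hpq hq
  rcases Nat.eq_or_lt_of_le hpq with he | hlt
  · subst he; exact le_refl _
  · have hp := PySem.List.sorted_pairwise T (fun x => x)
    rw [List.pairwise_iff_getElem] at hp
    have := hp p q (by omega) hq hlt
    rw [List.getD_eq_getElem _ _ (by omega), List.getD_eq_getElem _ _ hq]
    exact this

-- ===== VERDICT (by name: the statement is the Claim_ definition above) =====
theorem insert_to_heap_spec : Claim_equal_insert_to_heap := by
  unfold Claim_equal_insert_to_heap
  intro T key hdom hpre
  unfold Spec_insert_to_heap
  simp only [insert_to_heap, insert_to_heap_alt, bubble_up]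
  rw [heap_sort_eq_sorted T]
  have hpre0 : (PySem.List.sorted T (fun x => x) false) = [] ∨
      (PySem.List.sorted T (fun x => x) false).getD 0 0 ≤ key := by
    unfold Pre_insert_to_heap at hpre
    rcases hpre with h | ⟨x, hx, hxk⟩
    · subst h
      exact Or.inl ((PySem.List.sorted_eq_nil_iff [] (fun x => x) false).mpr rfl)
    · right
      have hxS : x ∈ PySem.List.sorted T (fun x => x) false :=
        (PySem.List.mem_sorted T (fun x => x) false x).mpr hx
      cases hS : PySem.List.sorted T (fun x => x) false with
      | nil => rw [hS] at hxS; simp at hxS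
      | cons m t =>
        have hm := PySem.List.key_head_sorted_le T (fun x => x) hS x hx
        simp only [List.getD_cons_zero]
        exact le_trans hm hxk
  have hmain := bubble_main (PySem.List.sorted T (fun x => x) false) key
    (sorted_getD_mono T) hpre0
    ((((PySem.List.sorted T (fun x => x) false).length : Int) + 2).toNat)
    ((PySem.List.sorted T (fun x => x) false).length)
    (PySem.List.sorted T (fun x => x) false ++ [key])
    (by omega) le_rfl (by simp) (fun j _ => rfl)
    (by rw [List.getD_eq_getElem _ _ (by simp)]
        simp)
    (fun h => h)
  rw [hmain]
  simp only [PySem.List.pyGetD_natCast]
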